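-- pv_equiv track=rewrite | github.com/mitsukake29/gpt-usage-report | usage_report.py | compute_turns
-- ===== SOURCE A (Python) =====
-- from typing import Any, Dict, Iterable, List, Optional, Set, Tuple
--
-- def compute_turns(messages: List[Dict[str, Any]]) -> int:
--     turns = 0
--     awaiting_assistant = False
--     for msg in messages:
--         role = msg.get("role")
--         if role == "user":
--             awaiting_assistant = True
--         elif role == "assistant" and awaiting_assistant:
--             turns += 1
--             awaiting_assistant = False
--     return turns
-- ===== SOURCE B (Python) =====
-- def compute_turns(messages):
--     roles = [m.get("role") for m in messages
--              if m.get("role") in ("user", "assistant")]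
--     return sum(1 for prev, cur in zip(roles, roles[1:])
--                if prev == "user" and cur == "assistant")
-- ===== Notes on version B (the rewrite author's own statement) =====
-- stated objective: alternative
-- what changed: Replaces the awaiting_assistant state machine with a filter of the role stream to user/assistant roles followed by a pairwise zip counting adjacent (user, assistant) pairs.
import Mathlib
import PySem

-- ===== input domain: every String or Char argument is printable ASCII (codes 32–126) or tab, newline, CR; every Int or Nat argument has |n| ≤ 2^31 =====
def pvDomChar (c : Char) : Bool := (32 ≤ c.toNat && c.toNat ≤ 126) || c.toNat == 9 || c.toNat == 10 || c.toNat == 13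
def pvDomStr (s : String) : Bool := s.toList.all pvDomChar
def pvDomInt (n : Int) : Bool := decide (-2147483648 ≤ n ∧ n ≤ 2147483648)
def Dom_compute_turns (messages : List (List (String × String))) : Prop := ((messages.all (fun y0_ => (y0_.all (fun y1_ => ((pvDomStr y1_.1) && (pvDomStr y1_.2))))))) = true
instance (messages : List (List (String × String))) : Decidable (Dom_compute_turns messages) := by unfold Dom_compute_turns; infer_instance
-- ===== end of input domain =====

-- B replaces A's awaiting_assistant state machine by filtering the role stream and
-- counting adjacent (user, assistant) pairs with a pairwise zip (objective: alternative).

-- ===== PORT A =====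
-- msg.get("role"): first match in the association list (dict lookup)
def pvGetRole (msg : List (String × String)) : Option String :=
  (msg.find? (fun kv => kv.1 == "role")).map (·.2)

-- the loop body of A: update (turns, awaiting_assistant) for one message
def pvStepA (st : Int × Bool) (msg : List (String × String)) : Int × Bool :=
  let role := pvGetRole msg
  if role = some "user" then (st.1, true)
  else if role = some "assistant" ∧ st.2 = true then (st.1 + 1, false)
  else st

def compute_turns (messages : List (List (String × String))) : Int :=
  (messages.foldl pvStepA (0, false)).1

-- ===== PORT B =====
-- the list comprehension [m.get("role") for m in messages if m.get("role") in ("user","assistant")]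
def pvRoles (messages : List (List (String × String))) : List String :=
  messages.filterMap (fun m =>
    (pvGetRole m).bind (fun r => if r = "user" ∨ r = "assistant" then some r else none))

-- sum(1 for prev, cur in zip(roles, roles[1:]) if prev == "user" and cur == "assistant")
def compute_turns_alt (messages : List (List (String × String))) : Int :=
  let roles := pvRoles messages
  (roles.zip (roles.drop 1)).foldl
    (fun (acc : Int) p => if p.1 = "user" ∧ p.2 = "assistant" then acc + 1 else acc) 0

-- ===== PRECONDITION & SPEC =====
def Spec_compute_turns (messages : List (List (String × String))) (out : Int) : Prop := out = compute_turns_alt messages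
instance (messages : List (List (String × String))) (out : Int) : Decidable (Spec_compute_turns messages out) := by unfold Spec_compute_turns; infer_instance

-- ===== CLAIM (what is proved, stated in full; the proofs are below) =====
def Claim_equal_compute_turns : Prop := ∀ (messages : List (List (String × String))), Dom_compute_turns messages → Spec_compute_turns messages (compute_turns messages)

-- ===== LEMMAS AND PROOFS =====

-- number of adjacent (user, assistant) pairs in a role stream
def pvPC : List String → Int
  | [] => 0
  | [_] => 0
  | x :: y :: t => (if x = "user" ∧ y = "assistant" then 1 else 0) + pvPC (y :: t)

theorem pvPC_head_irrel (x y : String) (rs : List String)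
    (hx : x ≠ "user") (hy : y ≠ "user") : pvPC (x :: rs) = pvPC (y :: rs) := by
  cases rs with
  | nil => rfl
  | cons z t => simp [pvPC, hx, hy]

theorem pvPC_cons_ne (x : String) (rs : List String) (hx : x ≠ "user") :
    pvPC (x :: rs) = pvPC rs := by
  cases rs with
  | nil => rfl
  | cons z t => simp [pvPC, hx]

-- A's fold computes the pair count, with the awaiting flag encoded as a virtual previous role
theorem pvA_fold (messages : List (List (String × String))) :
    ∀ (t : Int) (b : Bool),
      (messages.foldl pvStepA (t, b)).1
        = t + pvPC ((if b then "user" else "") :: pvRoles messages) := by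
  induction messages with
  | nil =>
    intro t b
    cases b <;> simp [pvRoles, pvPC]
  | cons m rest ih =>
    intro t b
    rw [List.foldl_cons]
    by_cases hu : pvGetRole m = some "user"
    · have hroles : pvRoles (m :: rest) = "user" :: pvRoles rest := by
        simp [pvRoles, hu]
      have hstep : pvStepA (t, b) m = (t, true) := by simp [pvStepA, hu]
      rw [hstep, ih t true, hroles]
      cases b <;> simp [pvPC]
    · by_cases ha : pvGetRole m = some "assistant"
      · have hroles : pvRoles (m :: rest) = "assistant" :: pvRoles rest := by
          simp [pvRoles, ha]
        rw [hroles]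
        cases b with
        | true =>
          have hstep : pvStepA (t, true) m = (t + 1, false) := by
            simp [pvStepA, ha]
          rw [hstep, ih (t + 1) false]
          have h1 : pvPC ("user" :: "assistant" :: pvRoles rest)
              = 1 + pvPC ("assistant" :: pvRoles rest) := by
            simp [pvPC]
          simp only [if_true, Bool.false_eq_true, if_false]
          rw [h1, pvPC_head_irrel "" "assistant" (pvRoles rest) (by decide) (by decide)]
          ring
        | false =>
          have hstep : pvStepA (t, false) m = (t, false) := by
            simp [pvStepA, hu]
          rw [hstep, ih t false]
          simp only [Bool.false_eq_true, if_false]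
          rw [pvPC_cons_ne "" ("assistant" :: pvRoles rest) (by decide),
            pvPC_head_irrel "" "assistant" (pvRoles rest) (by decide) (by decide)]
      · have hroles : pvRoles (m :: rest) = pvRoles rest := by
          cases hr : pvGetRole m with
          | none => simp [pvRoles, hr]
          | some r =>
            have hru : r ≠ "user" := by rintro rfl; exact hu hr
            have hra : r ≠ "assistant" := by rintro rfl; exact ha hr
            simp [pvRoles, hr, hru, hra]
        have hstep : pvStepA (t, b) m = (t, b) := by
          simp [pvStepA, hu]
          intro h; exact absurd h ha
        rw [hstep, ih t b, hroles]

-- B's zip fold computes the pair count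
theorem pvB_fold (roles : List String) :
    ∀ (acc : Int),
      (roles.zip (roles.drop 1)).foldl
        (fun (acc : Int) p => if p.1 = "user" ∧ p.2 = "assistant" then acc + 1 else acc) acc
      = acc + pvPC roles := by
  induction roles using pvPC.induct with
  | case1 => intro acc; simp [pvPC]
  | case2 x => intro acc; simp [pvPC]
  | case3 x y t ih =>
    intro acc
    have hzip : (x :: y :: t).zip ((x :: y :: t).drop 1)
        = (x, y) :: (y :: t).zip ((y :: t).drop 1) := by
      simp
    rw [hzip, List.foldl_cons]
    by_cases h : x = "user" ∧ y = "assistant"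
    · rw [if_pos h, ih (acc + 1)]
      simp [pvPC, h]; ring
    · rw [if_neg h, ih acc]
      simp [pvPC, h]

-- ===== VERDICT (by name: the statement is the Claim_ definition above) =====
theorem compute_turns_spec : Claim_equal_compute_turns := by
  intro messages _
  unfold Spec_compute_turns compute_turns compute_turns_alt
  rw [pvA_fold messages 0 false, pvB_fold (pvRoles messages) 0]
  have h0 : (if (false : Bool) then "user" else "") = "" := rfl
  rw [h0, pvPC_cons_ne "" (pvRoles messages) (by decide)]
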